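-- pv_equiv track=rewrite | github.com/5Color/breeding-program | 품종개량 프로그램.py | even_split_ranges
-- ===== SOURCE A (Python) =====
-- from typing import List, Tuple, Dict, Any
--
-- def even_split_ranges(n: int, k: int) -> List[Tuple[int,int]]:
--     base = n // k
--     r = n % k
--     seglens = [(base + 1 if i < r else base) for i in range(k)]
--     ranges = []
--     cur = 0
--     for L in seglens:
--         ranges.append((cur, cur + L))
--         cur += L
--     return ranges
-- ===== SOURCE B (Python) =====
-- def even_split_ranges(n: int, k: int):
--     base, r = divmod(n, k)
--     return [(i * base + min(i, r), (i + 1) * base + min(i + 1, r)) for i in range(k)]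
-- ===== Notes on version B (the rewrite author's own statement) =====
-- stated objective: alternative
-- what changed: B eliminates the precomputed segment-length list and the running cursor accumulator: each range's boundaries are computed in closed form from its index i as i*base+min(i,r), so there is no state threaded through the loop.
import Mathlib
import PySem

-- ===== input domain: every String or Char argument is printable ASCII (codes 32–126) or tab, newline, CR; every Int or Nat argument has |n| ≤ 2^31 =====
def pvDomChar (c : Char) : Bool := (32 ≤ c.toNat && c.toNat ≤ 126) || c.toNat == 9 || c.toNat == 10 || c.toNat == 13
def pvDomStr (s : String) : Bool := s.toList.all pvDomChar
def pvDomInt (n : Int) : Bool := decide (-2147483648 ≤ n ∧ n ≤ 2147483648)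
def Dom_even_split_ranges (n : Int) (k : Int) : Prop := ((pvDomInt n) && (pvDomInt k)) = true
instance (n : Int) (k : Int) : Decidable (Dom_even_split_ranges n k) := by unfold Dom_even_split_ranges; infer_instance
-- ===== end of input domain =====

-- B replaces A's running-cursor fold with a closed-form boundary i*base + min(i,r) per index (alternative decomposition, same cost).

-- ===== PORT A =====
def even_split_ranges (n : Int) (k : Int) : List (Int × Int) :=
  let base := PySem.Int.floordiv n k
  let r := PySem.Int.mod n k
  let seglens := (PySem.List.pyRange 0 k 1).map (fun i => if i < r then base + 1 else base)
  (seglens.foldl (fun (st : List (Int × Int) × Int) L => (st.1 ++ [(st.2, st.2 + L)], st.2 + L)) ([], 0)).1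

-- ===== PORT B =====
def even_split_ranges_alt (n : Int) (k : Int) : List (Int × Int) :=
  let base := PySem.Int.floordiv n k
  let r := PySem.Int.mod n k
  (PySem.List.pyRange 0 k 1).map
    (fun i => (i * base + min i r, (i + 1) * base + min (i + 1) r))

-- ===== PRECONDITION & SPEC =====
-- Pre_ excludes exactly k = 0, on which Python's divmod raises ZeroDivisionError.
def Pre_even_split_ranges (n : Int) (k : Int) : Prop := k ≠ 0
instance (n : Int) (k : Int) : Decidable (Pre_even_split_ranges n k) := by unfold Pre_even_split_ranges; infer_instance
def pvWitness_even_split_ranges : Int × Int := (7, 3)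

def Spec_even_split_ranges (n : Int) (k : Int) (out : List (Int × Int)) : Prop := out = even_split_ranges_alt n k
instance (n : Int) (k : Int) (out : List (Int × Int)) : Decidable (Spec_even_split_ranges n k out) := by unfold Spec_even_split_ranges; infer_instance

-- ===== CLAIM (what is proved, stated in full; the proofs are below) =====
def Claim_equal_even_split_ranges : Prop := ∀ (n : Int) (k : Int), Dom_even_split_ranges n k → Pre_even_split_ranges n k → Spec_even_split_ranges n k (even_split_ranges n k)

-- ===== LEMMAS AND PROOFS =====

-- cursor invariant: folding A's segment lengths over [a, b) starting at the
-- closed-form boundary c a = a*base + min a r produces exactly B's pairs.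
theorem pv_fold_key (base r : Int) : ∀ (m : Nat) (a b : Int), b - a = m →
    ∀ (acc : List (Int × Int)),
    ((PySem.List.pyRange a b 1).map (fun i => if i < r then base + 1 else base)).foldl
        (fun (st : List (Int × Int) × Int) L => (st.1 ++ [(st.2, st.2 + L)], st.2 + L))
        (acc, a * base + min a r)
      = (acc ++ (PySem.List.pyRange a b 1).map
            (fun i => (i * base + min i r, (i + 1) * base + min (i + 1) r)),
         b * base + min b r) := by
  intro m
  induction m with
  | zero =>
      intro a b hab acc
      have hba : b = a := by omega
      subst hba
      simp [PySem.List.pyRange_one_eq_nil le_rfl]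
  | succ m ih =>
      intro a b hab acc
      have hlt : a < b := by omega
      rw [PySem.List.pyRange_one_cons hlt]
      have hstep : a * base + min a r + (if a < r then base + 1 else base)
          = (a + 1) * base + min (a + 1) r := by
        by_cases h : a < r
        · have h1 : min a r = a := min_eq_left (le_of_lt h)
          have h2 : min (a + 1) r = a + 1 := min_eq_left (by omega)
          rw [h1, h2]; simp [h]; ring
        · have h1 : min a r = r := min_eq_right (by omega)
          have h2 : min (a + 1) r = r := min_eq_right (by omega)
          rw [h1, h2]; simp [h]; ring
      simp only [List.map_cons, List.foldl_cons]
      rw [hstep, ih (a + 1) b (by omega)]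
      simp

-- ===== VERDICT (by name: the statement is the Claim_ definition above) =====
theorem even_split_ranges_spec : Claim_equal_even_split_ranges := by
  intro n k _ hk
  show even_split_ranges n k = even_split_ranges_alt n k
  unfold even_split_ranges even_split_ranges_alt
  show ((((PySem.List.pyRange 0 k 1).map
        (fun i => if i < PySem.Int.mod n k then PySem.Int.floordiv n k + 1 else PySem.Int.floordiv n k)).foldl
        (fun (st : List (Int × Int) × Int) L => (st.1 ++ [(st.2, st.2 + L)], st.2 + L)) ([], 0)).1
      = (PySem.List.pyRange 0 k 1).map
          (fun i => (i * PySem.Int.floordiv n k + min i (PySem.Int.mod n k),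
              (i + 1) * PySem.Int.floordiv n k + min (i + 1) (PySem.Int.mod n k))))
  rcases lt_trichotomy k 0 with hkneg | hk0 | hkpos
  · simp [PySem.List.pyRange_one_eq_nil (by omega : k ≤ (0:Int))]
  · exact absurd hk0 hk
  · have hr0 : 0 ≤ PySem.Int.mod n k := PySem.Int.mod_nonneg n hkpos
    have h0 : (0 : Int) * PySem.Int.floordiv n k + min 0 (PySem.Int.mod n k) = 0 := by
      rw [min_eq_left hr0]; ring
    have hkey := pv_fold_key (PySem.Int.floordiv n k) (PySem.Int.mod n k) (k - 0).toNat 0 k (by omega) []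
    rw [h0] at hkey
    rw [hkey]
    simp
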